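-- pv_equiv track=rewrite | github.com/carlalozu/serinv-utils | scaling/flops/scpobbasi_flops.py | scpobbasi_flops
-- ===== SOURCE A (Python) =====
-- def scpobbasi_flops(n_diag_blocks, diagonal_blocksize, arrowhead_blocksize, n_offdiags_blk):
--     FLOPS = 0
--     counts = {
--         'triangular_solve_ns3': 0,
--         'triangular_solve_nb3': 0,
--         'DGEMM_ns3': 0,
--         'DGEMM_ns2nb': 0,
--         'DGEMM_nsnb2': 0,
--         'DGEMM_nb3': 0
--     }
--
--     counts['triangular_solve_nb3'] += 1
--     FLOPS += arrowhead_blocksize**3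
--
--     counts['DGEMM_nb3'] += 1
--     FLOPS += 2 * arrowhead_blocksize**3
--
--     counts['triangular_solve_ns3'] += 1
--     FLOPS += diagonal_blocksize**3
--
--     # X_{ndb+1, ndb} = -X_{ndb+1, ndb+1} L_{ndb+1, ndb} L_{ndb, ndb}^{-1}
--     counts['DGEMM_nsnb2'] += 1
--     FLOPS += 2 * arrowhead_blocksize**2 * diagonal_blocksize
--     counts['DGEMM_ns2nb'] += 1
--     FLOPS += 2 * arrowhead_blocksize * diagonal_blocksize**2
--
--
--     # X_{ndb, ndb} = (L_{ndb, ndb}^{-T} - X_{ndb+1, ndb}^{T} L_{ndb+1, ndb}) L_{ndb, ndb}^{-1}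
--     counts['DGEMM_ns2nb'] += 1
--     FLOPS += 2 * diagonal_blocksize**2 * arrowhead_blocksize
--     counts['DGEMM_ns3'] += 1
--     FLOPS += 2 * diagonal_blocksize**3
--
--     for i in range(n_diag_blocks - 2, -1, -1):
--
--         # L_blk_inv = L_{i, i}^{-1}
--         counts['triangular_solve_ns3'] += 1
--         FLOPS += diagonal_blocksize**3
--
--         # Arrowhead part
--         # X_{ndb+1, i} = - X_{ndb+1, ndb+1} L_{ndb+1, i}
--         counts['DGEMM_nsnb2'] += 1
--         FLOPS += 2 * arrowhead_blocksize**2 * diagonal_blocksize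
--
--         for k in range(i + 1, min(i + n_offdiags_blk + 1, n_diag_blocks), 1):
--             # X_{ndb+1, i} = X_{ndb+1, i} - X_{ndb+1, k} L_{k, i}
--             counts['DGEMM_ns2nb'] += 1
--             FLOPS += 2 * arrowhead_blocksize * diagonal_blocksize**2
--
--         # X_{ndb+1, i} = X_{ndb+1, i} L_{i, i}^{-1}
--         counts['DGEMM_ns2nb'] += 1
--         FLOPS += 2 * arrowhead_blocksize * diagonal_blocksize**2
--
--         # Off-diagonal block part
--         for j in range(min(i + n_offdiags_blk, n_diag_blocks - 1), i, -1):
--             # Take the effect of the arrowhead part into account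
--             # X_{j, i} = - X_{ndb+1, j}.T L_{ndb+1, i}
--             counts['DGEMM_ns2nb'] += 1
--             FLOPS += 2 * arrowhead_blocksize * diagonal_blocksize**2
--
--             for k in range(i + 1, j):
--                 # X_{j, i} = X_{j, i} - X_{j, k} @ L_{k, i}, k<j
--                 counts['DGEMM_ns3'] += 1
--                 FLOPS += 2 * diagonal_blocksize**3
--
--             # X_{j, i} = X_{j, i} - X_{j, j} @ L_{j, i}, k=j
--             counts['DGEMM_ns3'] += 1
--             FLOPS += 2 * diagonal_blocksize**3
--
--             for k in range(j+1, min(i + n_offdiags_blk + 1, n_diag_blocks)):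
--                 # X_{j, i} = X_{j, i} - X_{k, j}.T @ L_{k, i}, k>j
--                 counts['DGEMM_ns3'] += 1
--                 FLOPS += 2 * diagonal_blocksize**3
--
--             # X_{j, i} = X_{j, i} L_{i, i}^{-1}
--
--             counts['DGEMM_ns3'] += 1
--             FLOPS += 2 * diagonal_blocksize**3
--
--         # Diagonal block part
--         # X_{i, i} = L_{i, i}^{-T} - X_{ndb+1, i}.T L_{ndb+1, i}
--         counts['DGEMM_ns2nb'] += 1
--         FLOPS += 2 * diagonal_blocksize**2 * arrowhead_blocksize
--
--         for k in range(i + 1, min(i + n_offdiags_blk + 1, n_diag_blocks), 1):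
--             # X_{i, i} = X_{i, i} - X_{k, i}.T L_{k, i}
--             counts['DGEMM_ns3'] += 1
--             FLOPS += 2 * diagonal_blocksize**3
--
--         # X_{i, i} = X_{i, i} L_{i, i}^{-1}
--         counts['DGEMM_ns3'] += 1
--         FLOPS += 2 * diagonal_blocksize**3
--
--     return int(FLOPS), counts
-- ===== SOURCE B (Python) =====
-- def scpobbasi_flops(n_diag_blocks, diagonal_blocksize, arrowhead_blocksize, n_offdiags_blk):
--     # Closed-form O(1) summation: every loop iteration count only depends on
--     # c(i) = max(0, min(n_offdiags_blk, n_diag_blocks - 1 - i)); sum c and c^2 in closed form.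
--     n, ns, nb, m = n_diag_blocks, diagonal_blocksize, arrowhead_blocksize, n_offdiags_blk
--     s0 = max(0, n - 1)                    # number of outer iterations
--     if m <= 0 or s0 == 0:
--         sc = 0                            # sum of c(i)
--         sc2 = 0                           # sum of c(i)**2
--     else:
--         M = min(m, n - 1)                 # c takes the values 1..M, then m repeated
--         rep = max(0, n - 1 - m)
--         sc = M * (M + 1) // 2 + rep * m
--         sc2 = M * (M + 1) * (2 * M + 1) // 6 + rep * m * m
--     tri_ns3 = 1 + s0
--     tri_nb3 = 1
--     ns3 = 1 + s0 + 2 * sc + sc2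
--     ns2nb = 2 + 2 * s0 + 2 * sc
--     nsnb2 = 1 + s0
--     nb3 = 1
--     flops = (tri_ns3 * ns**3 + tri_nb3 * nb**3 + ns3 * 2 * ns**3
--              + ns2nb * 2 * nb * ns**2 + nsnb2 * 2 * nb**2 * ns + nb3 * 2 * nb**3)
--     counts = {
--         'triangular_solve_ns3': tri_ns3,
--         'triangular_solve_nb3': tri_nb3,
--         'DGEMM_ns3': ns3,
--         'DGEMM_ns2nb': ns2nb,
--         'DGEMM_nsnb2': nsnb2,
--         'DGEMM_nb3': nb3,
--     }
--     return flops, counts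
-- ===== Notes on version B (the rewrite author's own statement) =====
-- stated objective: faster
-- what changed: Replaces the triple loop nest with an O(1) closed-form summation: each loop's iteration count depends only on c(i)=max(0,min(n_offdiags_blk,n_diag_blocks-1-i)), and the sums of c and c^2 are computed with the triangular/square-pyramidal formulas.
import Mathlib
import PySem

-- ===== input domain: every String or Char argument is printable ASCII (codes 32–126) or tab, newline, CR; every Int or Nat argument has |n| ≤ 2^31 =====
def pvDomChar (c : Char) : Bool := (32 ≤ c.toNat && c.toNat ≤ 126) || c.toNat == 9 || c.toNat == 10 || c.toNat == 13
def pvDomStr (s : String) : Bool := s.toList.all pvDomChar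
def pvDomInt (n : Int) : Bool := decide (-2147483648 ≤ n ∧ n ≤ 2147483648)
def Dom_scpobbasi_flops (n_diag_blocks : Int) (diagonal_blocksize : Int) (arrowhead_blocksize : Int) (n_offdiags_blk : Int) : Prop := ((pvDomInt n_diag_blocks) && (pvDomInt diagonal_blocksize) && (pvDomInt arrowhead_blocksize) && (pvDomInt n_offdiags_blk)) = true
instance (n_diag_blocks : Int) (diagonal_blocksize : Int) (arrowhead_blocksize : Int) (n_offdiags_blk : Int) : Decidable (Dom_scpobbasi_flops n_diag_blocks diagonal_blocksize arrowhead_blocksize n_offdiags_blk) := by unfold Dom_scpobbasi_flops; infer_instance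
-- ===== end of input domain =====

-- B replaces A's triple loop nest by a closed-form O(1) summation of the iteration counts (objective: faster, asymptotic).

-- ===== PORT A =====
def scpobbasi_flops (n_diag_blocks : Int) (diagonal_blocksize : Int) (arrowhead_blocksize : Int) (n_offdiags_blk : Int) : Int × (List (String × Int)) :=
  let FLOPS : Int := 0
  let counts : PySem.Dict String Int := PySem.Dict.ofList
    [("triangular_solve_ns3", 0), ("triangular_solve_nb3", 0), ("DGEMM_ns3", 0),
     ("DGEMM_ns2nb", 0), ("DGEMM_nsnb2", 0), ("DGEMM_nb3", 0)]
  let counts := counts.modify "triangular_solve_nb3" 0 (· + 1)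
  let FLOPS := FLOPS + arrowhead_blocksize ^ 3
  let counts := counts.modify "DGEMM_nb3" 0 (· + 1)
  let FLOPS := FLOPS + 2 * arrowhead_blocksize ^ 3
  let counts := counts.modify "triangular_solve_ns3" 0 (· + 1)
  let FLOPS := FLOPS + diagonal_blocksize ^ 3
  let counts := counts.modify "DGEMM_nsnb2" 0 (· + 1)
  let FLOPS := FLOPS + 2 * arrowhead_blocksize ^ 2 * diagonal_blocksize
  let counts := counts.modify "DGEMM_ns2nb" 0 (· + 1)
  let FLOPS := FLOPS + 2 * arrowhead_blocksize * diagonal_blocksize ^ 2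
  let counts := counts.modify "DGEMM_ns2nb" 0 (· + 1)
  let FLOPS := FLOPS + 2 * diagonal_blocksize ^ 2 * arrowhead_blocksize
  let counts := counts.modify "DGEMM_ns3" 0 (· + 1)
  let FLOPS := FLOPS + 2 * diagonal_blocksize ^ 3
  let st := (PySem.List.pyRange (n_diag_blocks - 2) (-1) (-1)).foldl
    (fun st i =>
      let FLOPS := st.1
      let counts := st.2
      let counts := counts.modify "triangular_solve_ns3" 0 (· + 1)
      let FLOPS := FLOPS + diagonal_blocksize ^ 3
      let counts := counts.modify "DGEMM_nsnb2" 0 (· + 1)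
      let FLOPS := FLOPS + 2 * arrowhead_blocksize ^ 2 * diagonal_blocksize
      let st := (PySem.List.pyRange (i + 1) (min (i + n_offdiags_blk + 1) n_diag_blocks) 1).foldl
        (fun st _k =>
          (st.1 + 2 * arrowhead_blocksize * diagonal_blocksize ^ 2,
           st.2.modify "DGEMM_ns2nb" 0 (· + 1))) (FLOPS, counts)
      let FLOPS := st.1
      let counts := st.2
      let counts := counts.modify "DGEMM_ns2nb" 0 (· + 1)
      let FLOPS := FLOPS + 2 * arrowhead_blocksize * diagonal_blocksize ^ 2
      let st := (PySem.List.pyRange (min (i + n_offdiags_blk) (n_diag_blocks - 1)) i (-1)).foldl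
        (fun st j =>
          let FLOPS := st.1
          let counts := st.2
          let counts := counts.modify "DGEMM_ns2nb" 0 (· + 1)
          let FLOPS := FLOPS + 2 * arrowhead_blocksize * diagonal_blocksize ^ 2
          let st := (PySem.List.pyRange (i + 1) j 1).foldl
            (fun st _k =>
              (st.1 + 2 * diagonal_blocksize ^ 3,
               st.2.modify "DGEMM_ns3" 0 (· + 1))) (FLOPS, counts)
          let FLOPS := st.1
          let counts := st.2
          let counts := counts.modify "DGEMM_ns3" 0 (· + 1)
          let FLOPS := FLOPS + 2 * diagonal_blocksize ^ 3
          let st := (PySem.List.pyRange (j + 1) (min (i + n_offdiags_blk + 1) n_diag_blocks) 1).foldl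
            (fun st _k =>
              (st.1 + 2 * diagonal_blocksize ^ 3,
               st.2.modify "DGEMM_ns3" 0 (· + 1))) (FLOPS, counts)
          let FLOPS := st.1
          let counts := st.2
          let counts := counts.modify "DGEMM_ns3" 0 (· + 1)
          let FLOPS := FLOPS + 2 * diagonal_blocksize ^ 3
          (FLOPS, counts)) (FLOPS, counts)
      let FLOPS := st.1
      let counts := st.2
      let counts := counts.modify "DGEMM_ns2nb" 0 (· + 1)
      let FLOPS := FLOPS + 2 * diagonal_blocksize ^ 2 * arrowhead_blocksize
      let st := (PySem.List.pyRange (i + 1) (min (i + n_offdiags_blk + 1) n_diag_blocks) 1).foldl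
        (fun st _k =>
          (st.1 + 2 * diagonal_blocksize ^ 3,
           st.2.modify "DGEMM_ns3" 0 (· + 1))) (FLOPS, counts)
      let FLOPS := st.1
      let counts := st.2
      let counts := counts.modify "DGEMM_ns3" 0 (· + 1)
      let FLOPS := FLOPS + 2 * diagonal_blocksize ^ 3
      (FLOPS, counts)) (FLOPS, counts)
  (st.1, st.2.items)

-- ===== PORT B =====
def scpobbasi_flops_alt (n_diag_blocks : Int) (diagonal_blocksize : Int) (arrowhead_blocksize : Int) (n_offdiags_blk : Int) : Int × (List (String × Int)) :=
  let n := n_diag_blocks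
  let ns := diagonal_blocksize
  let nb := arrowhead_blocksize
  let m := n_offdiags_blk
  let s0 : Int := max 0 (n - 1)
  let scp : Int × Int :=
    if m ≤ 0 ∨ s0 = 0 then (0, 0)
    else
      let M := min m (n - 1)
      let rep := max 0 (n - 1 - m)
      (PySem.Int.floordiv (M * (M + 1)) 2 + rep * m,
       PySem.Int.floordiv (M * (M + 1) * (2 * M + 1)) 6 + rep * m * m)
  let sc := scp.1
  let sc2 := scp.2
  let tri_ns3 := 1 + s0
  let tri_nb3 : Int := 1
  let ns3 := 1 + s0 + 2 * sc + sc2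
  let ns2nb := 2 + 2 * s0 + 2 * sc
  let nsnb2 := 1 + s0
  let nb3 : Int := 1
  let flops := tri_ns3 * ns ^ 3 + tri_nb3 * nb ^ 3 + ns3 * 2 * ns ^ 3
    + ns2nb * 2 * nb * ns ^ 2 + nsnb2 * 2 * nb ^ 2 * ns + nb3 * 2 * nb ^ 3
  (flops,
   [("triangular_solve_ns3", tri_ns3), ("triangular_solve_nb3", tri_nb3),
    ("DGEMM_ns3", ns3), ("DGEMM_ns2nb", ns2nb),
    ("DGEMM_nsnb2", nsnb2), ("DGEMM_nb3", nb3)])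

-- ===== PRECONDITION & SPEC =====
def Spec_scpobbasi_flops (n_diag_blocks : Int) (diagonal_blocksize : Int) (arrowhead_blocksize : Int) (n_offdiags_blk : Int) (out : Int × (List (String × Int))) : Prop := out = scpobbasi_flops_alt n_diag_blocks diagonal_blocksize arrowhead_blocksize n_offdiags_blk
instance (n_diag_blocks : Int) (diagonal_blocksize : Int) (arrowhead_blocksize : Int) (n_offdiags_blk : Int) (out : Int × (List (String × Int))) : Decidable (Spec_scpobbasi_flops n_diag_blocks diagonal_blocksize arrowhead_blocksize n_offdiags_blk out) := by unfold Spec_scpobbasi_flops; infer_instance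

-- ===== CLAIM (what is proved, stated in full; the proofs are below) =====
def Claim_equal_scpobbasi_flops : Prop := ∀ (n_diag_blocks : Int) (diagonal_blocksize : Int) (arrowhead_blocksize : Int) (n_offdiags_blk : Int), Dom_scpobbasi_flops n_diag_blocks diagonal_blocksize arrowhead_blocksize n_offdiags_blk → Spec_scpobbasi_flops n_diag_blocks diagonal_blocksize arrowhead_blocksize n_offdiags_blk (scpobbasi_flops n_diag_blocks diagonal_blocksize arrowhead_blocksize n_offdiags_blk)

-- ===== LEMMAS AND PROOFS =====

def pvMkS (F a b c d e f : Int) : Int × PySem.Dict String Int :=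
  (F, PySem.Dict.mk [("triangular_solve_ns3", a), ("triangular_solve_nb3", b),
    ("DGEMM_ns3", c), ("DGEMM_ns2nb", d), ("DGEMM_nsnb2", e), ("DGEMM_nb3", f)])

theorem pv_fold_ns3 (l : List Int) (w F a b c d e f : Int) :
    l.foldl (fun st (_k : Int) => (st.1 + w, st.2.modify "DGEMM_ns3" 0 (· + 1))) (pvMkS F a b c d e f)
    = pvMkS (F + (l.length : Int) * w) a b (c + l.length) d e f := by
  induction l generalizing F c with
  | nil => simp
  | cons x t ih =>
    rw [List.foldl_cons,
      show ((pvMkS F a b c d e f).1 + w, (pvMkS F a b c d e f).2.modify "DGEMM_ns3" 0 (· + 1))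
        = pvMkS (F + w) a b (c + 1) d e f from rfl, ih]
    unfold pvMkS
    simp only [Prod.mk.injEq, PySem.Dict.mk.injEq, List.cons.injEq, List.length_cons, and_true, true_and]
    constructor <;> (push_cast; ring)

theorem pv_fold_ns2nb (l : List Int) (w F a b c d e f : Int) :
    l.foldl (fun st (_k : Int) => (st.1 + w, st.2.modify "DGEMM_ns2nb" 0 (· + 1))) (pvMkS F a b c d e f)
    = pvMkS (F + (l.length : Int) * w) a b c (d + l.length) e f := by
  induction l generalizing F d with
  | nil => simp
  | cons x t ih =>
    rw [List.foldl_cons,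
      show ((pvMkS F a b c d e f).1 + w, (pvMkS F a b c d e f).2.modify "DGEMM_ns2nb" 0 (· + 1))
        = pvMkS (F + w) a b c (d + 1) e f from rfl, ih]
    unfold pvMkS
    simp only [Prod.mk.injEq, PySem.Dict.mk.injEq, List.cons.injEq, List.length_cons, and_true, true_and]
    constructor <;> (push_cast; ring)

def pvJBody (n_diag_blocks diagonal_blocksize arrowhead_blocksize n_offdiags_blk i : Int) :
    (Int × PySem.Dict String Int) → Int → (Int × PySem.Dict String Int) :=
  fun st j =>
    let FLOPS := st.1
    let counts := st.2
    let counts := counts.modify "DGEMM_ns2nb" 0 (· + 1)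
    let FLOPS := FLOPS + 2 * arrowhead_blocksize * diagonal_blocksize ^ 2
    let st := (PySem.List.pyRange (i + 1) j 1).foldl
      (fun st _k =>
        (st.1 + 2 * diagonal_blocksize ^ 3,
         st.2.modify "DGEMM_ns3" 0 (· + 1))) (FLOPS, counts)
    let FLOPS := st.1
    let counts := st.2
    let counts := counts.modify "DGEMM_ns3" 0 (· + 1)
    let FLOPS := FLOPS + 2 * diagonal_blocksize ^ 3
    let st := (PySem.List.pyRange (j + 1) (min (i + n_offdiags_blk + 1) n_diag_blocks) 1).foldl
      (fun st _k =>
        (st.1 + 2 * diagonal_blocksize ^ 3,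
         st.2.modify "DGEMM_ns3" 0 (· + 1))) (FLOPS, counts)
    let FLOPS := st.1
    let counts := st.2
    let counts := counts.modify "DGEMM_ns3" 0 (· + 1)
    let FLOPS := FLOPS + 2 * diagonal_blocksize ^ 3
    (FLOPS, counts)

theorem pv_jbody_step (n ds ab m i j F a b c d e f : Int)
    (h1 : i + 1 ≤ j) (h2 : j + 1 ≤ min (i + m + 1) n) :
    pvJBody n ds ab m i (pvMkS F a b c d e f) j
    = pvMkS (F + 2 * ab * ds ^ 2 + (min (i + m + 1) n - i) * (2 * ds ^ 3))
        a b (c + (min (i + m + 1) n - i)) (d + 1) e f := by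
  have e1 : pvJBody n ds ab m i (pvMkS F a b c d e f) j
      = (((PySem.List.pyRange (j + 1) (min (i + m + 1) n) 1).foldl
            (fun st (_k : Int) => (st.1 + 2 * ds ^ 3, st.2.modify "DGEMM_ns3" 0 (· + 1)))
            (((PySem.List.pyRange (i + 1) j 1).foldl
                (fun st (_k : Int) => (st.1 + 2 * ds ^ 3, st.2.modify "DGEMM_ns3" 0 (· + 1)))
                (pvMkS (F + 2 * ab * ds ^ 2) a b c (d + 1) e f)).1 + 2 * ds ^ 3,
             ((PySem.List.pyRange (i + 1) j 1).foldl
                (fun st (_k : Int) => (st.1 + 2 * ds ^ 3, st.2.modify "DGEMM_ns3" 0 (· + 1)))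
                (pvMkS (F + 2 * ab * ds ^ 2) a b c (d + 1) e f)).2.modify "DGEMM_ns3" 0 (· + 1))).1 + 2 * ds ^ 3,
         ((PySem.List.pyRange (j + 1) (min (i + m + 1) n) 1).foldl
            (fun st (_k : Int) => (st.1 + 2 * ds ^ 3, st.2.modify "DGEMM_ns3" 0 (· + 1)))
            (((PySem.List.pyRange (i + 1) j 1).foldl
                (fun st (_k : Int) => (st.1 + 2 * ds ^ 3, st.2.modify "DGEMM_ns3" 0 (· + 1)))
                (pvMkS (F + 2 * ab * ds ^ 2) a b c (d + 1) e f)).1 + 2 * ds ^ 3,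
             ((PySem.List.pyRange (i + 1) j 1).foldl
                (fun st (_k : Int) => (st.1 + 2 * ds ^ 3, st.2.modify "DGEMM_ns3" 0 (· + 1)))
                (pvMkS (F + 2 * ab * ds ^ 2) a b c (d + 1) e f)).2.modify "DGEMM_ns3" 0 (· + 1))).2.modify "DGEMM_ns3" 0 (· + 1)) := rfl
  rw [e1]
  rw [pv_fold_ns3]
  rw [show ((pvMkS (F + 2 * ab * ds ^ 2 + ((PySem.List.pyRange (i+1) j 1).length : Int) * (2 * ds ^ 3)) a b (c + (PySem.List.pyRange (i+1) j 1).length) (d+1) e f).1 + 2 * ds ^ 3,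
        (pvMkS (F + 2 * ab * ds ^ 2 + ((PySem.List.pyRange (i+1) j 1).length : Int) * (2 * ds ^ 3)) a b (c + (PySem.List.pyRange (i+1) j 1).length) (d+1) e f).2.modify "DGEMM_ns3" 0 (· + 1))
      = pvMkS (F + 2 * ab * ds ^ 2 + ((PySem.List.pyRange (i+1) j 1).length : Int) * (2 * ds ^ 3) + 2 * ds ^ 3) a b (c + (PySem.List.pyRange (i+1) j 1).length + 1) (d+1) e f from rfl]
  rw [pv_fold_ns3]
  rw [show ∀ (G g : Int), ((pvMkS G a b g (d+1) e f).1 + 2 * ds ^ 3, (pvMkS G a b g (d+1) e f).2.modify "DGEMM_ns3" 0 (· + 1))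
      = pvMkS (G + 2 * ds ^ 3) a b (g + 1) (d+1) e f from fun _ _ => rfl]
  have l1 : ((PySem.List.pyRange (i+1) j 1).length : Int) = j - i - 1 := by
    rw [PySem.List.length_pyRange_one]; omega
  have l2 : ((PySem.List.pyRange (j+1) (min (i + m + 1) n) 1).length : Int) = min (i + m + 1) n - j - 1 := by
    rw [PySem.List.length_pyRange_one]; omega
  unfold pvMkS
  simp only [Prod.mk.injEq, PySem.Dict.mk.injEq, List.cons.injEq, and_true, true_and]
  rw [l1, l2]
  constructor <;> ring

theorem pv_jfold (n ds ab m i : Int) (l : List Int)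
    (h : ∀ j ∈ l, i + 1 ≤ j ∧ j + 1 ≤ min (i + m + 1) n) (F a b c d e f : Int) :
    l.foldl (pvJBody n ds ab m i) (pvMkS F a b c d e f)
    = pvMkS (F + (l.length : Int) * (2 * ab * ds ^ 2 + (min (i + m + 1) n - i) * (2 * ds ^ 3)))
        a b (c + (l.length : Int) * (min (i + m + 1) n - i)) (d + l.length) e f := by
  induction l generalizing F c d with
  | nil => simp
  | cons x t ih =>
    rw [List.foldl_cons, pv_jbody_step n ds ab m i x F a b c d e f (h x (by simp)).1 (h x (by simp)).2,
      ih (fun j hj => h j (List.mem_cons_of_mem x hj))]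
    unfold pvMkS
    simp only [Prod.mk.injEq, PySem.Dict.mk.injEq, List.cons.injEq, List.length_cons, and_true, true_and]
    and_intros <;> (push_cast; ring)

def pvOuterBody (n_diag_blocks diagonal_blocksize arrowhead_blocksize n_offdiags_blk : Int) :
    (Int × PySem.Dict String Int) → Int → (Int × PySem.Dict String Int) :=
  fun st i =>
    let FLOPS := st.1
    let counts := st.2
    let counts := counts.modify "triangular_solve_ns3" 0 (· + 1)
    let FLOPS := FLOPS + diagonal_blocksize ^ 3
    let counts := counts.modify "DGEMM_nsnb2" 0 (· + 1)
    let FLOPS := FLOPS + 2 * arrowhead_blocksize ^ 2 * diagonal_blocksize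
    let st := (PySem.List.pyRange (i + 1) (min (i + n_offdiags_blk + 1) n_diag_blocks) 1).foldl
      (fun st _k =>
        (st.1 + 2 * arrowhead_blocksize * diagonal_blocksize ^ 2,
         st.2.modify "DGEMM_ns2nb" 0 (· + 1))) (FLOPS, counts)
    let FLOPS := st.1
    let counts := st.2
    let counts := counts.modify "DGEMM_ns2nb" 0 (· + 1)
    let FLOPS := FLOPS + 2 * arrowhead_blocksize * diagonal_blocksize ^ 2
    let st := (PySem.List.pyRange (min (i + n_offdiags_blk) (n_diag_blocks - 1)) i (-1)).foldl
      (pvJBody n_diag_blocks diagonal_blocksize arrowhead_blocksize n_offdiags_blk i) (FLOPS, counts)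
    let FLOPS := st.1
    let counts := st.2
    let counts := counts.modify "DGEMM_ns2nb" 0 (· + 1)
    let FLOPS := FLOPS + 2 * diagonal_blocksize ^ 2 * arrowhead_blocksize
    let st := (PySem.List.pyRange (i + 1) (min (i + n_offdiags_blk + 1) n_diag_blocks) 1).foldl
      (fun st _k =>
        (st.1 + 2 * diagonal_blocksize ^ 3,
         st.2.modify "DGEMM_ns3" 0 (· + 1))) (FLOPS, counts)
    let FLOPS := st.1
    let counts := st.2
    let counts := counts.modify "DGEMM_ns3" 0 (· + 1)
    let FLOPS := FLOPS + 2 * diagonal_blocksize ^ 3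
    (FLOPS, counts)

def pvC (n m i : Int) : Int := max 0 (min m (n - 1 - i))

def pvPhi (ds ab cc : Int) : Int :=
  (ds ^ 3 + 2 * ab ^ 2 * ds + 2 * ab * ds ^ 2 + 2 * ds ^ 2 * ab + 2 * ds ^ 3)
  + cc * (4 * ab * ds ^ 2 + 4 * ds ^ 3) + (cc * cc) * (2 * ds ^ 3)

theorem pv_outer_step (n ds ab m i F a b c d e f : Int) (hi : i ≤ n - 2) :
    pvOuterBody n ds ab m (pvMkS F a b c d e f) i
    = pvMkS (F + pvPhi ds ab (pvC n m i)) (a + 1) b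
        (c + (pvC n m i * (pvC n m i + 1) + pvC n m i + 1))
        (d + (2 * pvC n m i + 2)) (e + 1) f := by
  have e1 : pvOuterBody n ds ab m (pvMkS F a b c d e f) i
      = (let st1 := (PySem.List.pyRange (i + 1) (min (i + m + 1) n) 1).foldl
            (fun st (_k : Int) => (st.1 + 2 * ab * ds ^ 2, st.2.modify "DGEMM_ns2nb" 0 (· + 1)))
            (pvMkS (F + ds ^ 3 + 2 * ab ^ 2 * ds) (a + 1) b c d (e + 1) f)
         let st2 := (PySem.List.pyRange (min (i + m) (n - 1)) i (-1)).foldl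
            (pvJBody n ds ab m i)
            (st1.1 + 2 * ab * ds ^ 2, st1.2.modify "DGEMM_ns2nb" 0 (· + 1))
         let st3 := (PySem.List.pyRange (i + 1) (min (i + m + 1) n) 1).foldl
            (fun st (_k : Int) => (st.1 + 2 * ds ^ 3, st.2.modify "DGEMM_ns3" 0 (· + 1)))
            (st2.1 + 2 * ds ^ 2 * ab, st2.2.modify "DGEMM_ns2nb" 0 (· + 1))
         (st3.1 + 2 * ds ^ 3, st3.2.modify "DGEMM_ns3" 0 (· + 1))) := rfl
  rw [e1]
  simp only []
  rw [pv_fold_ns2nb]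
  rw [show ∀ G g : Int, ((pvMkS G (a+1) b c g (e+1) f).1 + 2 * ab * ds ^ 2, (pvMkS G (a+1) b c g (e+1) f).2.modify "DGEMM_ns2nb" 0 (· + 1))
      = pvMkS (G + 2 * ab * ds ^ 2) (a+1) b c (g + 1) (e+1) f from fun _ _ => rfl]
  rw [pv_jfold n ds ab m i _ (fun j hj => by
    rw [PySem.List.mem_pyRange_neg_one] at hj
    constructor <;> omega)]
  rw [show ∀ G g h : Int, ((pvMkS G (a+1) b g h (e+1) f).1 + 2 * ds ^ 2 * ab, (pvMkS G (a+1) b g h (e+1) f).2.modify "DGEMM_ns2nb" 0 (· + 1))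
      = pvMkS (G + 2 * ds ^ 2 * ab) (a+1) b g (h + 1) (e+1) f from fun _ _ _ => rfl]
  rw [pv_fold_ns3]
  rw [show ∀ G g h : Int, ((pvMkS G (a+1) b g h (e+1) f).1 + 2 * ds ^ 3, (pvMkS G (a+1) b g h (e+1) f).2.modify "DGEMM_ns3" 0 (· + 1))
      = pvMkS (G + 2 * ds ^ 3) (a+1) b (g + 1) h (e+1) f from fun _ _ _ => rfl]
  have lk : ((PySem.List.pyRange (i + 1) (min (i + m + 1) n) 1).length : Int) = pvC n m i := by
    rw [PySem.List.length_pyRange_one]; unfold pvC; omega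
  have lj : ((PySem.List.pyRange (min (i + m) (n - 1)) i (-1)).length : Int) = pvC n m i := by
    rw [PySem.List.length_pyRange_neg_one]; unfold pvC; omega
  have hW : pvC n m i * (min (i + m + 1) n - i) = pvC n m i * (pvC n m i + 1) := by
    rcases eq_or_lt_of_le (le_max_left 0 (min m (n - 1 - i))) with hz | hp
    · unfold pvC; rw [← hz]; ring
    · have : min (i + m + 1) n - i = pvC n m i + 1 := by unfold pvC at *; omega
      rw [this]
  unfold pvMkS
  simp only [Prod.mk.injEq, PySem.Dict.mk.injEq, List.cons.injEq, and_true, true_and]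
  rw [lk, lj]
  refine ⟨?_, ?_, ?_⟩
  · unfold pvPhi
    linear_combination (2 * ds ^ 3) * hW
  · linear_combination hW
  · ring

theorem pv_outer_fold (n ds ab m : Int) (l : List Int)
    (h : ∀ i ∈ l, 0 ≤ i ∧ i ≤ n - 2) (F a b c d e f : Int) :
    l.foldl (pvOuterBody n ds ab m) (pvMkS F a b c d e f)
    = pvMkS (F + (l.map (fun i => pvPhi ds ab (pvC n m i))).sum)
        (a + l.length) b
        (c + (l.map (fun i => pvC n m i * (pvC n m i + 1) + pvC n m i + 1)).sum)
        (d + (l.map (fun i => 2 * pvC n m i + 2)).sum)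
        (e + l.length) f := by
  induction l generalizing F a c d e with
  | nil => simp
  | cons x t ih =>
    rw [List.foldl_cons, pv_outer_step n ds ab m x F a b c d e f (h x (by simp)).2,
      ih (fun i hi => h i (List.mem_cons_of_mem x hi))]
    unfold pvMkS
    simp only [Prod.mk.injEq, PySem.Dict.mk.injEq, List.cons.injEq, List.length_cons,
      List.map_cons, List.sum_cons, and_true, true_and]
    and_intros <;> (push_cast; ring)

def pvSC (m : Int) (N : Nat) : Int :=
  if m ≤ 0 then 0
  else PySem.Int.floordiv (min m N * (min m N + 1)) 2 + max 0 ((N : Int) - m) * m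

def pvSC2 (m : Int) (N : Nat) : Int :=
  if m ≤ 0 then 0
  else PySem.Int.floordiv (min m N * (min m N + 1) * (2 * min m N + 1)) 6
    + max 0 ((N : Int) - m) * m * m

theorem pv_fd2 (q : Int) : PySem.Int.floordiv (2 * q) 2 = q := by
  rw [PySem.Int.floordiv_eq_iff_of_pos (by norm_num)]; omega

theorem pv_fd6 (q : Int) : PySem.Int.floordiv (6 * q) 6 = q := by
  rw [PySem.Int.floordiv_eq_iff_of_pos (by norm_num)]; omega

theorem pv_six_dvd (N : Nat) : ∃ q : Int, (N : Int) * ((N : Int) + 1) * (2 * (N : Int) + 1) = 6 * q := by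
  induction N with
  | zero => exact ⟨0, by norm_num⟩
  | succ N ih =>
    obtain ⟨q, hq⟩ := ih
    exact ⟨q + ((N : Int) + 1) * ((N : Int) + 1), by push_cast; linear_combination hq⟩

theorem pv_sumc (m : Int) (N : Nat) :
    ((List.range N).map (fun k : Nat => max 0 (min m ((k : Int) + 1)))).sum = pvSC m N := by
  induction N with
  | zero =>
    simp only [List.range_zero, List.map_nil, List.sum_nil, pvSC]
    split_ifs with hm
    · rfl
    · have e1 : min m ((0 : Nat) : Int) = 0 := by omega
      have e2 : max 0 (((0 : Nat) : Int) - m) = 0 := by omega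
      rw [e1, e2]
      norm_num
  | succ N ih =>
    rw [List.range_succ, List.map_append, List.sum_append, ih]
    simp only [List.map_cons, List.map_nil, List.sum_cons, List.sum_nil]
    unfold pvSC
    split_ifs with hm
    · omega
    · push_cast
      by_cases hNm : (N : Int) + 1 ≤ m
      · obtain ⟨q, hq⟩ := Int.even_mul_succ_self (N : Int)
        have h1 : (N : Int) * ((N : Int) + 1) = 2 * q := by omega
        have h2 : ((N : Int) + 1) * ((N : Int) + 1 + 1) = 2 * (q + (N : Int) + 1) := by
          linear_combination h1
        have e1 : min m ((N : Int)) = (N : Int) := by omega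
        have e2 : min m ((N : Int) + 1) = (N : Int) + 1 := by omega
        have e3 : max 0 ((N : Int) - m) = 0 := by omega
        have e4 : max 0 ((N : Int) + 1 - m) = 0 := by omega
        rw [e1, e2, e3, e4, h1, h2, pv_fd2, pv_fd2]
        omega
      · have e1 : min m ((N : Int)) = m := by omega
        have e2 : min m ((N : Int) + 1) = m := by omega
        have e3 : max 0 ((N : Int) - m) = (N : Int) - m := by omega
        have e4 : max 0 ((N : Int) + 1 - m) = (N : Int) + 1 - m := by omega
        rw [e1, e2, e3, e4]
        have e5 : max 0 m = m := by omega
        rw [e5]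
        ring

theorem pv_sumc2 (m : Int) (N : Nat) :
    ((List.range N).map (fun k : Nat =>
      max 0 (min m ((k : Int) + 1)) * max 0 (min m ((k : Int) + 1)))).sum = pvSC2 m N := by
  induction N with
  | zero =>
    simp only [List.range_zero, List.map_nil, List.sum_nil, pvSC2]
    split_ifs with hm
    · rfl
    · have e1 : min m ((0 : Nat) : Int) = 0 := by omega
      have e2 : max 0 (((0 : Nat) : Int) - m) = 0 := by omega
      rw [e1, e2]
      norm_num
  | succ N ih =>
    rw [List.range_succ, List.map_append, List.sum_append, ih]
    simp only [List.map_cons, List.map_nil, List.sum_cons, List.sum_nil]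
    unfold pvSC2
    split_ifs with hm
    · have e0 : max 0 (min m ((N : Int) + 1)) = 0 := by omega
      rw [e0]
      ring
    · push_cast
      by_cases hNm : (N : Int) + 1 ≤ m
      · obtain ⟨q, hq⟩ := pv_six_dvd N
        have h2 : ((N : Int) + 1) * ((N : Int) + 1 + 1) * (2 * ((N : Int) + 1) + 1)
            = 6 * (q + ((N : Int) + 1) * ((N : Int) + 1)) := by
          linear_combination hq
        have e1 : min m ((N : Int)) = (N : Int) := by omega
        have e2 : min m ((N : Int) + 1) = (N : Int) + 1 := by omega
        have e3 : max 0 ((N : Int) - m) = 0 := by omega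
        have e4 : max 0 ((N : Int) + 1 - m) = 0 := by omega
        have e5 : max 0 (min m ((N : Int) + 1)) = (N : Int) + 1 := by omega
        rw [e5, e1, e2, e3, e4, hq, h2, pv_fd6, pv_fd6]
        ring
      · have e1 : min m ((N : Int)) = m := by omega
        have e2 : min m ((N : Int) + 1) = m := by omega
        have e3 : max 0 ((N : Int) - m) = (N : Int) - m := by omega
        have e4 : max 0 ((N : Int) + 1 - m) = (N : Int) + 1 - m := by omega
        have e5 : max 0 (min m ((N : Int) + 1)) = m := by omega
        rw [e5, e1, e2, e3, e4]
        ring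

theorem pv_sum_poly (p q r : Int) (u : Nat → Int) (N : Nat) :
    ((List.range N).map (fun k => p + q * u k + r * (u k * u k))).sum
    = p * N + q * ((List.range N).map u).sum
      + r * ((List.range N).map (fun k => u k * u k)).sum := by
  induction N with
  | zero => simp
  | succ N ih =>
    rw [List.range_succ]
    simp only [List.map_append, List.sum_append, List.map_cons, List.map_nil,
      List.sum_cons, List.sum_nil, ih]
    push_cast
    ring

theorem pv_main (n ds ab m : Int) :
    scpobbasi_flops n ds ab m = scpobbasi_flops_alt n ds ab m := by
  have hA : scpobbasi_flops n ds ab m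
      = (let st := (PySem.List.pyRange (n - 2) (-1) (-1)).foldl (pvOuterBody n ds ab m)
          (pvMkS (0 + ab ^ 3 + 2 * ab ^ 3 + ds ^ 3 + 2 * ab ^ 2 * ds + 2 * ab * ds ^ 2
            + 2 * ds ^ 2 * ab + 2 * ds ^ 3) 1 1 1 2 1 1)
         (st.1, st.2.items)) := rfl
  rw [hA]
  simp only []
  rw [pv_outer_fold n ds ab m _ (fun i hi => by
    rw [PySem.List.mem_pyRange_neg_one] at hi; omega)]
  rw [PySem.List.pyRange_neg_one, show n - 2 - (-1) = n - 1 from by ring]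
  rw [List.map_map, List.map_map, List.map_map, List.length_map, List.length_range]
  rw [List.map_congr_left (l := List.range (n - 1).toNat)
      (f := (fun i => pvPhi ds ab (pvC n m i)) ∘ (fun k : Nat => n - 2 - (k : Int)))
      (g := fun k : Nat => (ds ^ 3 + 2 * ab ^ 2 * ds + 2 * ab * ds ^ 2 + 2 * ds ^ 2 * ab + 2 * ds ^ 3)
        + (4 * ab * ds ^ 2 + 4 * ds ^ 3) * (max 0 (min m ((k : Int) + 1)))
        + (2 * ds ^ 3) * ((max 0 (min m ((k : Int) + 1))) * (max 0 (min m ((k : Int) + 1)))))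
      (fun k _ => by
        simp only [Function.comp_apply]
        rw [show pvC n m (n - 2 - (k : Int)) = max 0 (min m ((k : Int) + 1)) from by
          unfold pvC; congr 1; congr 1; ring]
        unfold pvPhi; ring)]
  rw [List.map_congr_left (l := List.range (n - 1).toNat)
      (f := (fun i => pvC n m i * (pvC n m i + 1) + pvC n m i + 1) ∘ (fun k : Nat => n - 2 - (k : Int)))
      (g := fun k : Nat => (1 : Int)
        + 2 * (max 0 (min m ((k : Int) + 1)))
        + 1 * ((max 0 (min m ((k : Int) + 1))) * (max 0 (min m ((k : Int) + 1)))))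
      (fun k _ => by
        simp only [Function.comp_apply]
        rw [show pvC n m (n - 2 - (k : Int)) = max 0 (min m ((k : Int) + 1)) from by
          unfold pvC; congr 1; congr 1; ring]
        ring)]
  rw [List.map_congr_left (l := List.range (n - 1).toNat)
      (f := (fun i => 2 * pvC n m i + 2) ∘ (fun k : Nat => n - 2 - (k : Int)))
      (g := fun k : Nat => (2 : Int)
        + 2 * (max 0 (min m ((k : Int) + 1)))
        + 0 * ((max 0 (min m ((k : Int) + 1))) * (max 0 (min m ((k : Int) + 1)))))
      (fun k _ => by
        simp only [Function.comp_apply]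
        rw [show pvC n m (n - 2 - (k : Int)) = max 0 (min m ((k : Int) + 1)) from by
          unfold pvC; congr 1; congr 1; ring]
        ring)]
  rw [pv_sum_poly, pv_sum_poly, pv_sum_poly, pv_sumc, pv_sumc2]
  have hscp : (if m ≤ 0 ∨ max 0 (n - 1) = 0 then ((0 : Int), (0 : Int)) else
      (PySem.Int.floordiv (min m (n - 1) * (min m (n - 1) + 1)) 2 + max 0 (n - 1 - m) * m,
       PySem.Int.floordiv (min m (n - 1) * (min m (n - 1) + 1) * (2 * min m (n - 1) + 1)) 6
         + max 0 (n - 1 - m) * m * m))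
      = (pvSC m (n - 1).toNat, pvSC2 m (n - 1).toNat) := by
    by_cases h : m ≤ 0 ∨ max 0 (n - 1) = 0
    · rw [if_pos h]
      rcases h with hm | hn
      · unfold pvSC pvSC2
        rw [if_pos hm, if_pos hm]
      · have h0 : (n - 1).toNat = 0 := by omega
        rw [h0, ← pv_sumc m 0, ← pv_sumc2 m 0]
        simp
    · rw [if_neg h]
      rw [not_or] at h
      unfold pvSC pvSC2
      rw [if_neg (by omega), if_neg (by omega)]
      have hN : (((n - 1).toNat : Nat) : Int) = n - 1 := by omega
      rw [hN]
  simp only [scpobbasi_flops_alt]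
  rw [hscp]
  have hN : (((n - 1).toNat : Nat) : Int) = max 0 (n - 1) := by omega
  simp only [pvMkS, Prod.mk.injEq, List.cons.injEq, and_true, true_and]
  rw [hN]
  and_intros <;> ring

-- ===== VERDICT (by name: the statement is the Claim_ definition above) =====
theorem scpobbasi_flops_spec : Claim_equal_scpobbasi_flops := by
  intro n ds ab m _hdom
  unfold Spec_scpobbasi_flops
  exact pv_main n ds ab m
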